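-- pv_equiv track=rewrite | github.com/hereon-GEMS/pydidas | src/pydidas/core/utils/str_utils.py | get_formatted_blocks_from_docstring
-- ===== SOURCE A (Python) =====
-- def get_formatted_blocks_from_docstring(docstring: str) -> list[str]:
--     """
--     Get formatted blocks from a docstring.
--
--     This function will split the input docstring into blocks of text and strip
--     leading and trailing whitespaces while retaining the linebreaks.
--
--     Parameters
--     ----------
--     docstring : str
--         The input docstring.
--
--     Returns
--     -------
--     list[str]
--         The list with the formatted blocks.
--     """
--     _blocks = []
--     for _i, _doc_section in enumerate(docstring.split("\n\n")):
--         _formatted_section = ""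
--         for _line in _doc_section.strip().split("\n"):
--             if _line.startswith(8 * " "):
--                 if not _formatted_section.endswith("\n"):
--                     _formatted_section += "\n"
--                 _formatted_section += f"    {_line.strip()}\n"
--             else:
--                 _formatted_section += f"{_line.strip()} "
--         _formatted_section = _formatted_section.strip()
--         if _i > 0:
--             _formatted_section = "\n" + _formatted_section
--         if _formatted_section != "\n":
--             _blocks.append(_formatted_section)
--     return _blocks
-- ===== SOURCE B (Python) =====
-- def _render(lines):
--     """Render lines as maximal runs of same-kind (indented / non-indented) lines."""
--     if not lines:
--         return ""
--     ind = lines[0].startswith("        ")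
--     j = 1
--     while j < len(lines) and lines[j].startswith("        ") == ind:
--         j += 1
--     run, rest = lines[:j], lines[j:]
--     if ind:
--         body = "\n" + "".join("    " + line.strip() + "\n" for line in run)
--     else:
--         body = "".join(line.strip() + " " for line in run)
--     return body + _render(rest)
--
--
-- def get_formatted_blocks_from_docstring(docstring: str) -> list[str]:
--     sections = docstring.split("\n\n")
--     texts = [_render(section.strip().split("\n")).strip() for section in sections]
--     texts = [texts[0]] + ["\n" + text for text in texts[1:]]
--     return [text for text in texts if text != "\n"]
-- ===== Notes on version B (the rewrite author's own statement) =====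
-- stated objective: alternative
-- what changed: A builds each section with a single stateful string accumulator whose trailing-newline lookback decides when to open an indented block; B instead recursively decomposes the section's lines into maximal runs of indented / non-indented lines and renders each run wholesale, then assembles the blocks by map + filter instead of an enumerate-indexed fold.
import Mathlib
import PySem

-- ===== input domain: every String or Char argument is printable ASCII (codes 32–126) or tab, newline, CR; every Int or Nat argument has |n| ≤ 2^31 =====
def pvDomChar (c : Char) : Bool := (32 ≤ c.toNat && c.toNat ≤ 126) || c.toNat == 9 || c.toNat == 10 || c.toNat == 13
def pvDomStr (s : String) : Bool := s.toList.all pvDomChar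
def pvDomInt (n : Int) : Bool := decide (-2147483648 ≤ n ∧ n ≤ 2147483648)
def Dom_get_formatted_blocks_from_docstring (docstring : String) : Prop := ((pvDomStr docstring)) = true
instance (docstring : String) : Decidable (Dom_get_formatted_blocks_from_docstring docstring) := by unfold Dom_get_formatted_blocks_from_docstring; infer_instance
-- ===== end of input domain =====

-- B replaces A's stateful accumulator (with its trailing-newline lookback) by a
-- recursive decomposition of each section into maximal runs of indented /
-- non-indented lines, each run rendered wholesale; objective: alternative.

-- ===== PORT A =====
-- A's inner loop over the lines of one section (the '_formatted_section' accumulator).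
def pvFmtSectionA (sec : List Char) : List Char :=
  (PySem.Chars.splitOn (PySem.Chars.strip sec) ['\n']).foldl
    (fun fs line =>
      if PySem.Chars.startswith line (List.replicate 8 ' ') then
        let fs := if !PySem.Chars.endswith fs ['\n'] then fs ++ ['\n'] else fs
        fs ++ "    ".toList ++ PySem.Chars.strip line ++ ['\n']
      else
        fs ++ PySem.Chars.strip line ++ [' '])
    []

def get_formatted_blocks_from_docstring (docstring : String) : List String :=
  let sections := (PySem.Chars.split? docstring.toList "\n\n".toList).getD []
  ((PySem.List.enumerate sections).foldl
    (fun blocks (is : Int × List Char) =>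
      let fs := PySem.Chars.strip (pvFmtSectionA is.2)
      let fs := if is.1 > 0 then '\n' :: fs else fs
      if fs ≠ ['\n'] then blocks ++ [fs] else blocks)
    []).map String.ofList

-- ===== PORT B =====
-- B's '_render': split the lines into maximal same-kind runs, render each run wholesale.
def pvRender : List (List Char) → List Char
  | [] => []
  | l :: ls =>
    let ind := PySem.Chars.startswith l "        ".toList
    let run := l :: ls.takeWhile (fun x => PySem.Chars.startswith x "        ".toList == ind)
    let rest := ls.dropWhile (fun x => PySem.Chars.startswith x "        ".toList == ind)
    let body :=
      if ind then
        '\n' :: (run.map (fun x => "    ".toList ++ PySem.Chars.strip x ++ ['\n'])).flatten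
      else
        (run.map (fun x => PySem.Chars.strip x ++ [' '])).flatten
    body ++ pvRender rest
  termination_by ls => ls.length
  decreasing_by
    simpa using Nat.lt_succ_of_le (List.length_dropWhile_le _ _)

def get_formatted_blocks_from_docstring_alt (docstring : String) : List String :=
  let sections := (PySem.Chars.split? docstring.toList "\n\n".toList).getD []
  let texts := sections.map
    (fun s => PySem.Chars.strip (pvRender (PySem.Chars.splitOn (PySem.Chars.strip s) ['\n'])))
  let texts :=
    match texts with
    | [] => []
    | t :: ts => t :: ts.map (fun t => '\n' :: t)
  (texts.filter (fun t => t ≠ ['\n'])).map String.ofList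

-- ===== PRECONDITION & SPEC =====
def Spec_get_formatted_blocks_from_docstring (docstring : String) (out : List String) : Prop := out = get_formatted_blocks_from_docstring_alt docstring
instance (docstring : String) (out : List String) : Decidable (Spec_get_formatted_blocks_from_docstring docstring out) := by unfold Spec_get_formatted_blocks_from_docstring; infer_instance

-- ===== CLAIM (what is proved, stated in full; the proofs are below) =====
def Claim_equal_get_formatted_blocks_from_docstring : Prop := ∀ (docstring : String), Dom_get_formatted_blocks_from_docstring docstring → Spec_get_formatted_blocks_from_docstring docstring (get_formatted_blocks_from_docstring docstring)

-- ===== LEMMAS AND PROOFS =====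

-- A's inner loop restated line-wise, with the 'accumulator ends in a newline'
-- state made an explicit boolean flag p.
def pvRF (p : Bool) : List (List Char) → List Char
  | [] => []
  | l :: ls =>
    if PySem.Chars.startswith l (List.replicate 8 ' ') then
      (if p then [] else ['\n']) ++ "    ".toList ++ PySem.Chars.strip l ++ ['\n'] ++ pvRF true ls
    else
      PySem.Chars.strip l ++ [' '] ++ pvRF false ls

theorem pvEndswith_eq_decide (s p : List Char) :
    PySem.Chars.endswith s p = decide (p <:+ s) := by
  by_cases h : p <:+ s
  · simp [h, (PySem.Chars.endswith_iff s p).mpr h]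
  · simp [h]
    rw [Bool.eq_false_iff]
    intro hh
    exact h ((PySem.Chars.endswith_iff s p).mp hh)

theorem pvSuffix_singleton (x : List Char) (c d : Char) : [d] <:+ x ++ [c] ↔ c = d := by
  constructor
  · rintro ⟨t, ht⟩
    have h2 := congrArg List.getLast? ht
    simp at h2
    exact h2.symm
  · rintro rfl; exact ⟨x, rfl⟩

theorem pvEndswith_append_singleton (x : List Char) (c d : Char) :
    PySem.Chars.endswith (x ++ [c]) [d] = decide (c = d) := by
  rw [pvEndswith_eq_decide]
  simp [pvSuffix_singleton]

theorem pvFoldA_eq_pvRF (lines : List (List Char)) (acc : List Char) :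
    lines.foldl
      (fun fs line =>
        if PySem.Chars.startswith line (List.replicate 8 ' ') then
          let fs := if !PySem.Chars.endswith fs ['\n'] then fs ++ ['\n'] else fs
          fs ++ "    ".toList ++ PySem.Chars.strip line ++ ['\n']
        else
          fs ++ PySem.Chars.strip line ++ [' ']) acc
    = acc ++ pvRF (PySem.Chars.endswith acc ['\n']) lines := by
  induction lines generalizing acc with
  | nil => simp [pvRF]
  | cons l ls ih =>
    simp only [List.foldl_cons]
    by_cases h : PySem.Chars.startswith l (List.replicate 8 ' ') = true
    · -- indented line: the new accumulator ends in '\n'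
      simp only [h, if_pos]
      set fs0 := (if !PySem.Chars.endswith acc ['\n'] then acc ++ ['\n'] else acc) with hfs0
      have hre : fs0 ++ "    ".toList ++ PySem.Chars.strip l ++ ['\n']
          = (fs0 ++ "    ".toList ++ PySem.Chars.strip l) ++ ['\n'] := by
        simp [List.append_assoc]
      rw [ih, hre, pvEndswith_append_singleton]
      rw [pvRF]
      simp only [h, if_pos]
      rcases hacc : PySem.Chars.endswith acc ['\n'] with _ | _
      · rw [hfs0, hacc]
        simp [List.append_assoc]
      · rw [hfs0, hacc]
        simp [List.append_assoc]
    · -- plain line: the new accumulator ends in ' '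
      simp only [Bool.not_eq_true] at h
      rw [if_neg (by simp only [h]; exact Bool.false_ne_true)]
      have hre : acc ++ PySem.Chars.strip l ++ [' ']
          = (acc ++ PySem.Chars.strip l) ++ [' '] := by
        simp [List.append_assoc]
      rw [ih, hre, pvEndswith_append_singleton]
      rw [pvRF]
      rw [if_neg (by simp only [h]; exact Bool.false_ne_true)]
      simp [List.append_assoc]

theorem pvRF_true_of_head_not_indented (lines : List (List Char))
    (h : lines = [] ∨ ∃ l ls, lines = l :: ls ∧ PySem.Chars.startswith l (List.replicate 8 ' ') = false) :
    pvRF true lines = pvRF false lines := by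
  rcases h with rfl | ⟨l, ls, rfl, hl⟩
  · rfl
  · have hl' : PySem.Chars.startswith l [' ', ' ', ' ', ' ', ' ', ' ', ' ', ' '] = false := hl
    rw [pvRF, pvRF]
    simp [hl']

theorem pvRF_all_indented (run rest : List (List Char))
    (h : ∀ x ∈ run, PySem.Chars.startswith x (List.replicate 8 ' ') = true) :
    pvRF true (run ++ rest)
      = (run.map (fun x => "    ".toList ++ PySem.Chars.strip x ++ ['\n'])).flatten ++ pvRF true rest := by
  induction run with
  | nil => simp
  | cons x xs ihx =>
    rw [List.cons_append, pvRF]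
    simp only [h x (by simp), if_pos]
    rw [ihx (fun y hy => h y (by simp [hy]))]
    simp [List.append_assoc]

theorem pvRF_all_plain (run rest : List (List Char)) (p : Bool)
    (h : ∀ x ∈ run, PySem.Chars.startswith x (List.replicate 8 ' ') = false) :
    pvRF p (run ++ rest)
      = (run.map (fun x => PySem.Chars.strip x ++ [' '])).flatten
        ++ pvRF (if run.isEmpty then p else false) rest := by
  induction run generalizing p with
  | nil => rfl
  | cons x xs ihx =>
    rw [List.cons_append, pvRF]
    simp only [h x (by simp)]
    rw [ihx false (fun y hy => h y (by simp [hy]))]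
    rcases xs with _ | ⟨y, ys⟩ <;> simp [List.append_assoc]

theorem pvRender_eq_pvRF_false : ∀ lines : List (List Char), pvRender lines = pvRF false lines
  | [] => by rw [pvRender]; rfl
  | l :: ls => by
    rw [pvRender]
    have hsp : ("        ".toList : List Char) = List.replicate 8 ' ' := by decide
    rcases hind : PySem.Chars.startswith l "        ".toList with _ | _
    · -- plain head
      have hsplit : l :: ls
          = (l :: ls.takeWhile (fun x => PySem.Chars.startswith x "        ".toList == false))
            ++ ls.dropWhile (fun x => PySem.Chars.startswith x "        ".toList == false) := by
        simp [List.takeWhile_append_dropWhile]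
      have hrest := pvRender_eq_pvRF_false (ls.dropWhile (fun x => PySem.Chars.startswith x "        ".toList == false))
      rw [hrest]
      conv_rhs => rw [hsplit]
      rw [pvRF_all_plain _ _ false (by
        intro x hx
        rcases List.mem_cons.mp hx with hx | hx
        · subst hx; rw [← hsp, hind]
        · have := List.mem_takeWhile_imp hx
          simp [hsp] at this
          simpa using this)]
      simp
    · -- indented head
      have hsplit : l :: ls
          = (l :: ls.takeWhile (fun x => PySem.Chars.startswith x "        ".toList == true))
            ++ ls.dropWhile (fun x => PySem.Chars.startswith x "        ".toList == true) := by
        simp [List.takeWhile_append_dropWhile]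
      have hrest := pvRender_eq_pvRF_false (ls.dropWhile (fun x => PySem.Chars.startswith x "        ".toList == true))
      conv_rhs => rw [hsplit]
      rw [List.cons_append, pvRF]
      simp only [← hsp, hind, if_pos]
      rw [pvRF_all_indented _ _ (by
        intro x hx
        have := List.mem_takeWhile_imp hx
        simpa [hsp] using this)]
      have hhead : (ls.dropWhile (fun x => PySem.Chars.startswith x "        ".toList == true)) = []
          ∨ ∃ r rs, (ls.dropWhile (fun x => PySem.Chars.startswith x "        ".toList == true)) = r :: rs
              ∧ PySem.Chars.startswith r (List.replicate 8 ' ') = false := by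
        rcases hr : ls.dropWhile (fun x => PySem.Chars.startswith x "        ".toList == true) with _ | ⟨r, rs⟩
        · exact Or.inl rfl
        · refine Or.inr ⟨r, rs, rfl, ?_⟩
          have hne : ls.dropWhile (fun x => PySem.Chars.startswith x "        ".toList == true) ≠ [] := by
            rw [hr]; exact List.cons_ne_nil _ _
          have := List.head_dropWhile_not (fun x => PySem.Chars.startswith x "        ".toList == true) (l := ls) hne
          simp only [hr, List.head_cons] at this
          simpa [hsp] using this
      rw [pvRF_true_of_head_not_indented _ hhead, ← hrest]
      simp [List.append_assoc]
  termination_by lines => lines.length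
  decreasing_by
    all_goals simpa using Nat.lt_succ_of_le (List.length_dropWhile_le _ _)

theorem pvSection_eq (sec : List Char) :
    pvFmtSectionA sec = pvRender (PySem.Chars.splitOn (PySem.Chars.strip sec) ['\n']) := by
  rw [pvFmtSectionA, pvFoldA_eq_pvRF, pvRender_eq_pvRF_false]
  have : PySem.Chars.endswith ([] : List Char) ['\n'] = false := by decide
  rw [this]
  rfl

-- the per-section text both sides compute
def pvG (s : List Char) : List Char :=
  PySem.Chars.strip (pvRender (PySem.Chars.splitOn (PySem.Chars.strip s) ['\n']))

-- A's outer loop body, named so the fold lemmas below are stable under rw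
def pvStepA (blocks : List (List Char)) (is : Int × List Char) : List (List Char) :=
  let fs := PySem.Chars.strip (pvFmtSectionA is.2)
  let fs := if is.1 > 0 then '\n' :: fs else fs
  if fs ≠ ['\n'] then blocks ++ [fs] else blocks

theorem pvTail_fold (ts : List (List Char)) :
    ∀ (k : Int), 1 ≤ k → ∀ (acc : List (List Char)),
      (PySem.List.enumerate ts k).foldl pvStepA acc
      = acc ++ (ts.map (fun s => '\n' :: pvG s)).filter (fun t => t ≠ ['\n']) := by
  induction ts with
  | nil => intro k hk acc; simp [PySem.List.enumerate]
  | cons t ts ih =>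
    intro k hk acc
    rw [PySem.List.enumerate]
    simp only [List.foldl_cons]
    rw [ih (k + 1) (by omega)]
    have hk0 : k > 0 := by omega
    simp only [pvStepA, hk0, if_pos, pvSection_eq t, List.map_cons, List.filter_cons]
    by_cases hgt : pvG t = []
    · have h2 : PySem.Chars.strip (pvRender (PySem.Chars.splitOn (PySem.Chars.strip t) ['\n'])) = [] := by
        simpa [pvG] using hgt
      simp [h2, pvG]
    · have h2 : ¬ PySem.Chars.strip (pvRender (PySem.Chars.splitOn (PySem.Chars.strip t) ['\n'])) = [] := by
        simpa [pvG] using hgt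
      simp [h2, pvG, List.append_assoc]

theorem pvOuter_eq (sections : List (List Char)) :
    (PySem.List.enumerate sections).foldl pvStepA []
    = (match sections.map pvG with
        | [] => []
        | t :: ts => t :: ts.map (fun t => '\n' :: t)).filter (fun t => t ≠ ['\n']) := by
  rcases sections with _ | ⟨s0, rest⟩
  · simp [PySem.List.enumerate]
  · rw [PySem.List.enumerate]
    simp only [List.foldl_cons]
    rw [pvTail_fold rest (0 + 1) (by omega)]
    simp only [List.map_cons, List.filter_cons]
    have h0 : ¬ ((0 : Int) > 0) := by omega
    simp only [pvStepA, h0, pvSection_eq s0]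
    rw [List.map_map]
    by_cases hne : PySem.Chars.strip (pvRender (PySem.Chars.splitOn (PySem.Chars.strip s0) ['\n'])) = ['\n']
    · simp [pvG, Function.comp_def, hne]
    · simp [pvG, Function.comp_def, hne]

-- ===== VERDICT (by name: the statement is the Claim_ definition above) =====
theorem get_formatted_blocks_from_docstring_spec : Claim_equal_get_formatted_blocks_from_docstring := by
  intro docstring _
  show _ = _
  exact congrArg (List.map String.ofList)
    (pvOuter_eq ((PySem.Chars.split? docstring.toList "\n\n".toList).getD []))
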